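-- pv_equiv track=rewrite | github.com/deesatzed/Genesis_Prime | option1_mono_agent_PriorVersion/gph_security_framework.py | _analyze_word_patterns
-- ===== SOURCE A (Python) =====
-- from typing import Dict, List, Set, Optional, Tuple, Any, Union
--
-- def _analyze_word_patterns(words: List[str]) -> str:
--     """Analyze patterns in word selection"""
--     if len(words) < 3:
--         return None
--
--     # Check for unusual word length patterns
--     lengths = [len(word) for word in words]
--     if len(set(lengths)) == 1 and lengths[0] > 8:  # All words same unusual length
--         return f"uniform_length_{lengths[0]}"
--
--     # Check for alphabetical ordering
--     if words == sorted(words):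
--         return "alphabetical_order"
--
--     # Check for reverse alphabetical ordering
--     if words == sorted(words, reverse=True):
--         return "reverse_alphabetical_order"
--
--     return None
-- ===== SOURCE B (Python) =====
-- def _analyze_word_patterns(words):
--     """Analyze patterns in word selection"""
--     if len(words) < 3:
--         return None
--     n0 = len(words[0])
--     if n0 > 8 and all(len(w) == n0 for w in words):
--         return f"uniform_length_{n0}"
--     if all(a <= b for a, b in zip(words, words[1:])):
--         return "alphabetical_order"
--     if all(a >= b for a, b in zip(words, words[1:])):
--         return "reverse_alphabetical_order"
--     return None
-- ===== Notes on version B (the rewrite author's own statement) =====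
-- stated objective: simpler
-- what changed: Replaces the two sort-and-compare checks with single linear adjacent-pair scans (zip of the list with its tail) and the set-of-lengths cardinality test with an all-lengths-equal-to-first scan.
import Mathlib
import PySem

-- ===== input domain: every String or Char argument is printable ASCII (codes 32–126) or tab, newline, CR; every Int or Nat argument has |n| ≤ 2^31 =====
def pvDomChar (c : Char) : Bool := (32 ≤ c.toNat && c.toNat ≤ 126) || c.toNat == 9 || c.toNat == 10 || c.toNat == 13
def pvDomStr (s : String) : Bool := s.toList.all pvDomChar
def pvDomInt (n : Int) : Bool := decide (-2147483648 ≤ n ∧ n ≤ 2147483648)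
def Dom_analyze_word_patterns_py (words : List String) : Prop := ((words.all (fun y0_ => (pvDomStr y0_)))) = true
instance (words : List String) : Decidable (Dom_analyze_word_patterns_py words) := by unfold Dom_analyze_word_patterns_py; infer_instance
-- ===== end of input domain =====

-- B replaces the two sort-and-compare checks with single adjacent-pair scans and the
-- set-of-lengths cardinality test with an all-lengths-equal-to-first scan (simpler).

-- ===== PORT A =====
def analyze_word_patterns_py (words : List String) : Option String :=
  if words.length < 3 then none
  else
    let lengths := words.map (fun w => PySem.Str.len w)
    if (PySem.Set.ofList lengths).length = 1 ∧ lengths.headD 0 > 8 then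
      some ("uniform_length_" ++ PySem.Int.toStr (lengths.headD 0))
    else if words = PySem.List.sorted words (fun x => x) false then
      some "alphabetical_order"
    else if words = PySem.List.sorted words (fun x => x) true then
      some "reverse_alphabetical_order"
    else none

-- ===== PORT B =====
def analyze_word_patterns_py_alt (words : List String) : Option String :=
  if words.length < 3 then none
  else
    let n0 := PySem.Str.len (words.headD "")
    if n0 > 8 ∧ words.all (fun w => PySem.Str.len w == n0) then
      some ("uniform_length_" ++ PySem.Int.toStr n0)
    else if (words.zip (words.drop 1)).all (fun p => decide (p.1 ≤ p.2)) then
      some "alphabetical_order"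
    else if (words.zip (words.drop 1)).all (fun p => decide (p.2 ≤ p.1)) then
      some "reverse_alphabetical_order"
    else none

-- ===== PRECONDITION & SPEC =====
def Spec_analyze_word_patterns_py (words : List String) (out : Option String) : Prop := out = analyze_word_patterns_py_alt words
instance (words : List String) (out : Option String) : Decidable (Spec_analyze_word_patterns_py words out) := by unfold Spec_analyze_word_patterns_py; infer_instance

-- ===== CLAIM (what is proved, stated in full; the proofs are below) =====
def Claim_equal_analyze_word_patterns_py : Prop := ∀ (words : List String), Dom_analyze_word_patterns_py words → Spec_analyze_word_patterns_py words (analyze_word_patterns_py words)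

-- ===== LEMMAS AND PROOFS =====

-- set(xs) has one element iff every element of xs equals the first
theorem pv_setlen_one (a : Int) (l : List Int) :
    (PySem.Set.ofList (a :: l)).length = 1 ↔ ∀ x ∈ l, x = a := by
  constructor
  · intro h x hx
    obtain ⟨c, hc⟩ := List.length_eq_one_iff.mp h
    have hxs : x ∈ PySem.Set.ofList (a :: l) :=
      (PySem.Set.mem_ofList _ _).mpr (List.mem_cons_of_mem _ hx)
    have has : a ∈ PySem.Set.ofList (a :: l) :=
      (PySem.Set.mem_ofList _ _).mpr List.mem_cons_self
    rw [hc] at hxs has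
    simp only [List.mem_singleton] at hxs has
    omega
  · intro h
    have hmem : ∀ x ∈ PySem.Set.ofList (a :: l), x = a := by
      intro x hx
      rcases List.mem_cons.mp ((PySem.Set.mem_ofList _ _).mp hx) with rfl | h2
      · rfl
      · exact h _ h2
    have ha : a ∈ PySem.Set.ofList (a :: l) :=
      (PySem.Set.mem_ofList _ _).mpr List.mem_cons_self
    have hnd : (PySem.Set.ofList (a :: l)).Nodup := PySem.Set.nodup_ofList _
    cases hs : PySem.Set.ofList (a :: l) with
    | nil => rw [hs] at ha; cases ha
    | cons b t =>
      cases t with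
      | nil => rfl
      | cons c u =>
        rw [hs] at hmem hnd
        have hb := hmem b List.mem_cons_self
        have hc := hmem c (List.mem_cons_of_mem _ List.mem_cons_self)
        subst hb; subst hc
        simp at hnd

-- adjacent-pair scan via zip is the IsChain predicate
theorem pv_zipAll_iff_isChain {α : Type} (R : α → α → Prop) [DecidableRel R] :
    ∀ (l : List α), ((l.zip (l.drop 1)).all (fun p => decide (R p.1 p.2)) = true) ↔ l.IsChain R
  | [] => by simp
  | [a] => by simp
  | a :: b :: t => by
    have ih := pv_zipAll_iff_isChain R (b :: t)
    simp only [List.drop_succ_cons, List.drop_zero, List.zip_cons_cons, List.all_cons,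
      Bool.and_eq_true, decide_eq_true_eq, List.isChain_cons_cons] at *
    exact and_congr Iff.rfl ih

-- words == sorted(words)  iff  every adjacent pair is ≤
theorem pv_sorted_iff_pairwise (words : List String) :
    words = PySem.List.sorted words (fun x => x) false ↔
      List.Pairwise (fun a b : String => a ≤ b) words := by
  constructor
  · intro h
    have := PySem.List.sorted_pairwise words (fun x => x)
    rw [← h] at this
    exact this
  · intro h
    exact (PySem.List.sorted_eq_self_of_pairwise words (fun x => x) h).symm

-- words == sorted(words, reverse=True)  iff  every adjacent pair is ≥
theorem pv_sorted_rev_iff_pairwise (words : List String) :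
    words = PySem.List.sorted words (fun x => x) true ↔
      List.Pairwise (fun a b : String => b ≤ a) words := by
  constructor
  · intro h
    have := PySem.List.sorted_pairwise_rev words (fun x => x)
    rw [← h] at this
    exact this
  · intro h
    exact (PySem.List.sorted_rev_eq_self_of_pairwise words (fun x => x) h).symm

theorem pv_asc_iff (words : List String) :
    ((words.zip (words.drop 1)).all (fun p => decide (p.1 ≤ p.2)) = true) ↔
      words = PySem.List.sorted words (fun x => x) false := by
  rw [pv_sorted_iff_pairwise, ← List.isChain_iff_pairwise]
  exact pv_zipAll_iff_isChain (fun a b : String => a ≤ b) words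

theorem pv_desc_iff (words : List String) :
    ((words.zip (words.drop 1)).all (fun p => decide (p.2 ≤ p.1)) = true) ↔
      words = PySem.List.sorted words (fun x => x) true := by
  haveI : Trans (fun a b : String => b ≤ a) (fun a b : String => b ≤ a)
      (fun a b : String => b ≤ a) := ⟨fun h1 h2 => le_trans h2 h1⟩
  rw [pv_sorted_rev_iff_pairwise, ← List.isChain_iff_pairwise]
  exact pv_zipAll_iff_isChain (fun a b : String => b ≤ a) words

-- the two uniform-length guards agree on a nonempty list
theorem pv_uniform_iff (w0 : String) (rest : List String) :
    ((PySem.Set.ofList ((w0 :: rest).map (fun w => PySem.Str.len w))).length = 1 ∧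
        ((w0 :: rest).map (fun w => PySem.Str.len w)).headD 0 > 8) ↔
      (PySem.Str.len ((w0 :: rest).headD "") > 8 ∧
        (w0 :: rest).all (fun w => PySem.Str.len w == PySem.Str.len ((w0 :: rest).headD "")) = true) := by
  simp only [List.map_cons, List.headD_cons, pv_setlen_one, List.all_cons,
    Bool.and_eq_true, beq_iff_eq, List.all_eq_true]
  constructor
  · rintro ⟨h1, h2⟩
    exact ⟨h2, trivial, fun w hw => h1 _ (List.mem_map_of_mem hw)⟩
  · rintro ⟨h2, -, h1⟩
    refine ⟨fun x hx => ?_, h2⟩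
    obtain ⟨w, hw, rfl⟩ := List.mem_map.mp hx
    exact h1 _ hw

-- ===== VERDICT (by name: the statement is the Claim_ definition above) =====
theorem analyze_word_patterns_py_spec : Claim_equal_analyze_word_patterns_py := by
  intro words _
  unfold Spec_analyze_word_patterns_py analyze_word_patterns_py analyze_word_patterns_py_alt
  by_cases h3 : words.length < 3
  · simp [h3]
  · rw [if_neg h3, if_neg h3]
    obtain ⟨w0, rest, rfl⟩ : ∃ w0 rest, words = w0 :: rest := by
      cases words with
      | nil => simp at h3
      | cons a t => exact ⟨a, t, rfl⟩
    by_cases hu : (PySem.Str.len ((w0 :: rest).headD "") > 8 ∧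
        (w0 :: rest).all (fun w => PySem.Str.len w == PySem.Str.len ((w0 :: rest).headD "")) = true)
    · rw [if_pos ((pv_uniform_iff w0 rest).mpr hu), if_pos hu]
      have : ((w0 :: rest).map (fun w => PySem.Str.len w)).headD 0
          = PySem.Str.len ((w0 :: rest).headD "") := by simp
      rw [this]
    · rw [if_neg (fun h => hu ((pv_uniform_iff w0 rest).mp h)), if_neg hu]
      by_cases ha : ((w0 :: rest).zip ((w0 :: rest).drop 1)).all (fun p => decide (p.1 ≤ p.2)) = true
      · rw [if_pos ((pv_asc_iff _).mp ha), if_pos ha]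
      · rw [if_neg (fun h => ha ((pv_asc_iff _).mpr h)), if_neg ha]
        by_cases hd : ((w0 :: rest).zip ((w0 :: rest).drop 1)).all (fun p => decide (p.2 ≤ p.1)) = true
        · rw [if_pos ((pv_desc_iff _).mp hd), if_pos hd]
        · rw [if_neg (fun h => hd ((pv_desc_iff _).mpr h)), if_neg hd]
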